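-- pv_equiv track=rewrite | github.com/Krithids/open_book_test_Intech_additive_solutions | string_compression.py | second_compress
-- ===== SOURCE A (Python) =====
-- def second_compress(s):
--     result = ""
--     i = 0
--     group_chars = []
--     group_count = ""
--
--     while i < len(s):
--         char = s[i]
--         i += 1
--         count = ""
--         while i < len(s) and s[i].isdigit():
--             count += s[i]
--             i += 1
--
--         if not group_chars:
--             group_chars.append(char)
--             group_count = count
--         elif count == group_count:
--             group_chars.append(char)
--         else:
--             result += "".join(group_chars) + group_count
--             group_chars = [char]
--             group_count = count
--
--     # Add the final group
--     if group_chars: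
--         result += "".join(group_chars) + group_count
--
--     return result
-- ===== SOURCE B (Python) =====
-- def second_compress(s):
--     # Phase 1: tokenize into (char, count-string) tokens
--     tokens = []
--     i = 0
--     n = len(s)
--     while i < n:
--         j = i + 1
--         while j < n and s[j].isdigit():
--             j += 1
--         tokens.append((s[i], s[i + 1:j]))
--         i = j
--     # Phase 2: no grouping state -- emit each char, and emit its count exactly
--     # when it ends a maximal run of equal counts (last token or next count differs)
--     out = []
--     for idx, (c, k) in enumerate(tokens):
--         out.append(c)
--         if idx + 1 == len(tokens) or tokens[idx + 1][1] != k: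
--             out.append(k)
--     return ''.join(out)
-- ===== Notes on version B (the rewrite author's own statement) =====
-- stated objective: alternative
-- what changed: A streams through s maintaining a mutable current group (group_chars/group_count) and flushes it at count changes; B keeps no group state at all: it tokenizes s into (char,count-string) tokens, then emits each char unconditionally and its count only at a group boundary (one-token lookahead), joining once at the end.
import Mathlib
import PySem

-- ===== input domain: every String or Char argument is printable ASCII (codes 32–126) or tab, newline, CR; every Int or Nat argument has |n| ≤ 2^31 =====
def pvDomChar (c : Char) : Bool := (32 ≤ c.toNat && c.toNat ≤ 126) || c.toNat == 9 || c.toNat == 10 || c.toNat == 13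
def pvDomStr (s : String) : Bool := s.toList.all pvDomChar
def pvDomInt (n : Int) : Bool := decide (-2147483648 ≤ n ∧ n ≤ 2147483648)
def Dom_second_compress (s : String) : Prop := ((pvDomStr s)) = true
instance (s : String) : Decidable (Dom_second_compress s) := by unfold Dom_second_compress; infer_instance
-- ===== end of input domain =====

-- B replaces A's mutable-group streaming loop by: tokenize into (char, count-string)
-- tokens, then emit each char and its count only at a group boundary via one-token
-- lookahead — no group accumulator (objective: alternative).
-- Strings are modelled as List Char (PySem convention); s[i].isdigit() is PySem.Chars.isdigit.

-- ===== PORT A =====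
-- inner while: count += s[i] while s[i].isdigit()
def scA (acc : List Char) : List Char → List Char × List Char
  | [] => (acc, [])
  | c :: rest => if PySem.Chars.isdigit c then scA (acc ++ [c]) rest else (acc, c :: rest)

theorem scA_snd_length_le (acc cs : List Char) : (scA acc cs).2.length ≤ cs.length := by
  induction cs generalizing acc with
  | nil => simp [scA]
  | cons c rest ih =>
    simp only [scA]
    split
    · exact Nat.le_trans (ih _) (Nat.le_succ _)
    · simp

-- the outer while loop of A, state = (remaining input, result, group_chars, group_count)
def aLoop : List Char → List Char → List Char → List Char → List Char
  | [], result, gc, gcount => if gc = [] then result else result ++ gc ++ gcount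
  | c :: rest, result, gc, gcount =>
    let p := scA [] rest
    if gc = [] then aLoop p.2 result [c] p.1
    else if p.1 = gcount then aLoop p.2 result (gc ++ [c]) gcount
    else aLoop p.2 (result ++ gc ++ gcount) [c] p.1
termination_by cs _ _ _ => cs.length
decreasing_by all_goals
  exact Nat.lt_succ_of_le (scA_snd_length_le [] rest)

def second_compress (s : String) : String :=
  String.ofList (aLoop s.toList [] [] [])

-- ===== PORT B =====
-- Phase 1: tokens.append((s[i], s[i+1:j])) where j scans the digit run after i
def tokenizeB : List (Char × List Char) → List Char → List (Char × List Char)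
  | acc, [] => acc
  | acc, c :: rest =>
    tokenizeB (acc ++ [(c, rest.takeWhile PySem.Chars.isdigit)])
      (rest.dropWhile PySem.Chars.isdigit)
termination_by _ cs => cs.length
decreasing_by
  exact Nat.lt_succ_of_le (List.length_dropWhile_le _ _)

-- Phase 2: out.append(c); out.append(k) iff last token or next token's count differs
def emitB : List (Char × List Char) → List Char
  | [] => []
  | (c, k) :: ts =>
    (c :: (match ts with
           | [] => k
           | (_, k') :: _ => if k' ≠ k then k else [])) ++ emitB ts

def second_compress_alt (s : String) : String :=
  String.ofList (emitB (tokenizeB [] s.toList))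

-- ===== PRECONDITION & SPEC =====
def Spec_second_compress (s : String) (out : String) : Prop := out = second_compress_alt s
instance (s : String) (out : String) : Decidable (Spec_second_compress s out) := by unfold Spec_second_compress; infer_instance

-- ===== CLAIM =====
def Claim_equal_second_compress : Prop := ∀ (s : String), Dom_second_compress s → Spec_second_compress s (second_compress s)

-- ===== LEMMAS AND PROOFS =====

-- A's inner while is exactly the takeWhile/dropWhile split of the digit run
theorem scA_eq (acc cs : List Char) :
    scA acc cs = (acc ++ cs.takeWhile PySem.Chars.isdigit, cs.dropWhile PySem.Chars.isdigit) := by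
  induction cs generalizing acc with
  | nil => simp [scA]
  | cons c rest ih =>
    simp only [scA, List.takeWhile_cons, List.dropWhile_cons]
    split <;> simp_all

-- B's tokenizer without the accumulator
def toks : List Char → List (Char × List Char)
  | [] => []
  | c :: rest =>
    (c, rest.takeWhile PySem.Chars.isdigit) :: toks (rest.dropWhile PySem.Chars.isdigit)
termination_by cs => cs.length
decreasing_by
  exact Nat.lt_succ_of_le (List.length_dropWhile_le _ _)

theorem tokenizeB_eq_aux (n : Nat) :
    ∀ (cs : List Char), cs.length ≤ n → ∀ (acc : List (Char × List Char)),
      tokenizeB acc cs = acc ++ toks cs := by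
  induction n with
  | zero =>
    intro cs hcs acc
    cases cs with
    | nil => simp [tokenizeB, toks]
    | cons c rest => simp at hcs
  | succ n ih =>
    intro cs hcs acc
    cases cs with
    | nil => simp [tokenizeB, toks]
    | cons c rest =>
      have hlen : (List.dropWhile PySem.Chars.isdigit rest).length ≤ n := by
        have := List.length_dropWhile_le PySem.Chars.isdigit rest
        simp only [List.length_cons] at hcs
        omega
      rw [tokenizeB, toks, ih _ hlen, List.append_assoc]
      rfl

-- the tail of the output while "inside" a group whose count is k
def tailEmit (k : List Char) : List (Char × List Char) → List Char
  | [] => k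
  | (c, cnt) :: ts => if cnt = k then c :: tailEmit k ts else k ++ c :: tailEmit cnt ts

theorem emitB_cons (c : Char) (k : List Char) (ts : List (Char × List Char)) :
    emitB ((c, k) :: ts) = c :: tailEmit k ts := by
  induction ts generalizing c k with
  | nil => simp [emitB, tailEmit]
  | cons t ts ih =>
    obtain ⟨c', k'⟩ := t
    rw [emitB, ih, tailEmit]
    by_cases h : k' = k
    · subst h; simp
    · simp [h]

-- A's loop, restated as a recursion over the token list
def foldA : List (Char × List Char) → List Char → List Char → List Char → List Char
  | [], r, gc, k => if gc = [] then r else r ++ gc ++ k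
  | (c, cnt) :: ts, r, gc, k =>
    if gc = [] then foldA ts r [c] cnt
    else if cnt = k then foldA ts r (gc ++ [c]) k
    else foldA ts (r ++ gc ++ k) [c] cnt

theorem aLoop_eq_foldA_aux (n : Nat) :
    ∀ (cs : List Char), cs.length ≤ n → ∀ (r gc k : List Char),
      aLoop cs r gc k = foldA (toks cs) r gc k := by
  induction n with
  | zero =>
    intro cs hcs r gc k
    cases cs with
    | nil => simp [aLoop, toks, foldA]
    | cons c rest => simp at hcs
  | succ n ih =>
    intro cs hcs r gc k
    cases cs with
    | nil => simp [aLoop, toks, foldA]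
    | cons c rest =>
      have hlen : (List.dropWhile PySem.Chars.isdigit rest).length ≤ n := by
        have := List.length_dropWhile_le PySem.Chars.isdigit rest
        simp only [List.length_cons] at hcs
        omega
      rw [aLoop, toks, foldA]
      simp only [scA_eq, List.nil_append]
      split_ifs with h1 h2 <;> exact ih _ hlen _ _ _

-- main invariant: with a nonempty current group, A's fold = emitted prefix ++ group ++ tail
theorem foldA_eq_tailEmit (ts : List (Char × List Char)) :
    ∀ (r gc k : List Char), gc ≠ [] →
      foldA ts r gc k = r ++ gc ++ tailEmit k ts := by
  induction ts with
  | nil => intro r gc k h; simp [foldA, tailEmit, h]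
  | cons t ts ih =>
    intro r gc k h
    obtain ⟨c, cnt⟩ := t
    rw [foldA]
    simp only [if_neg h]
    by_cases hc : cnt = k
    · subst hc
      rw [if_pos rfl, ih r (gc ++ [c]) cnt (by simp), tailEmit, if_pos rfl]
      simp
    · rw [if_neg hc, ih (r ++ gc ++ k) [c] cnt (by simp), tailEmit, if_neg hc]
      simp

theorem main_eq (s : String) : second_compress s = second_compress_alt s := by
  unfold second_compress second_compress_alt
  rw [aLoop_eq_foldA_aux s.toList.length s.toList (le_refl _), tokenizeB_eq_aux s.toList.length s.toList (le_refl _), List.nil_append]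
  cases hts : toks s.toList with
  | nil => simp [foldA, emitB]
  | cons t ts =>
    obtain ⟨c, cnt⟩ := t
    rw [foldA, emitB_cons]
    rw [foldA_eq_tailEmit ts [] [c] cnt (by simp)]
    simp

-- ===== VERDICT =====
theorem second_compress_spec : Claim_equal_second_compress := by
  intro s _
  unfold Spec_second_compress
  exact main_eq s
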